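-- pv_equiv track=rewrite | github.com/PolLamothe/Neural-Network-Scratch | imageDetection/planeShipDetection.py | checkAnswer
-- ===== SOURCE A (Python) =====
-- def checkAnswer(right, response):
--     greater = None
--     for i in range(2):
--         if(greater == None):greater = (i,response[i])
--         else:
--             if(response[i] == greater[1]):return False
--             elif(response[i] > greater[1]):greater = (i,response[i])
--     if(greater[0] == right):return True
--     else:return False
-- ===== SOURCE B (Python) =====
-- def checkAnswer(right, response):
--     pair = response[:2]
--     top = max(pair)
--     winners = [i for i, v in enumerate(pair) if v == top]
--     return len(winners) == 1 and winners[0] == right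
-- ===== Notes on version B (the rewrite author's own statement) =====
-- stated objective: alternative
-- what changed: Replaces A's accumulator loop (running argmax with early return on a tie) by a staged two-pass computation: take the first two scores, compute their maximum, collect all indices attaining it, and return True iff exactly one index attains it and it equals right.
import Mathlib
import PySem

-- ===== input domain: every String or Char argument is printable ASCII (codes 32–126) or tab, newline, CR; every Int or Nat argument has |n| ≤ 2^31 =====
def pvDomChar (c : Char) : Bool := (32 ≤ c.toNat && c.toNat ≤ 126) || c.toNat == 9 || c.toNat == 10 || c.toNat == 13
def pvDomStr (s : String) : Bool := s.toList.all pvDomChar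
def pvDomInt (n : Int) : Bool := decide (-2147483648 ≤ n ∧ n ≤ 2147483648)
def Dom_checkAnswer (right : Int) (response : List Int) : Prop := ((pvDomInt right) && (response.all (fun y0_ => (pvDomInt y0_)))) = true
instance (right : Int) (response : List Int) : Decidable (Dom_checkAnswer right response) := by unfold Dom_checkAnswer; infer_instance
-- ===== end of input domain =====

-- B replaces A's running-argmax accumulator loop by a staged two-pass computation (max, then the indices attaining it); objective: alternative decomposition, same cost.


-- ===== PORT A =====
-- the for-loop over range(2); .inl b = an early `return b`, .inr g = loop finished with accumulator g
def checkAnswerGo (response : List Int) (is : List Int) (greater : Option (Int × Int)) :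
    Sum Bool (Option (Int × Int)) :=
  match is with
  | [] => .inr greater
  | i :: rest =>
    match greater with
    | none => checkAnswerGo response rest (some (i, (PySem.List.pyGet? response i).getD 0))
    | some g =>
      if (PySem.List.pyGet? response i).getD 0 = g.2 then .inl false
      else if (PySem.List.pyGet? response i).getD 0 > g.2 then
        checkAnswerGo response rest (some (i, (PySem.List.pyGet? response i).getD 0))
      else checkAnswerGo response rest (some g)

def checkAnswer (right : Int) (response : List Int) : Bool :=
  match checkAnswerGo response (PySem.List.pyRange 0 2 1) none with
  | .inl b => b
  | .inr greater =>
    match greater with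
    | some g => if g.1 = right then true else false
    | none => false  -- unreachable: range(2) is nonempty

-- ===== PORT B =====
def checkAnswer_alt (right : Int) (response : List Int) : Bool :=
  let pair := PySem.List.slice response (some 0) (some 2)
  match PySem.List.max? pair (fun x => x) with
  | none => false  -- unreachable under Pre_: Python's max raises ValueError on an empty list
  | some top =>
    let winners : List Int := ((PySem.List.enumerate pair 0).filter (fun p => p.2 == top)).map (fun p => p.1)
    winners.length == 1 && winners.headD 0 == right

-- ===== PRECONDITION & SPEC =====
-- A reads response[0] and response[1]; lists shorter than 2 raise IndexError in A.
def Pre_checkAnswer (right : Int) (response : List Int) : Prop := 2 ≤ response.length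
instance (right : Int) (response : List Int) : Decidable (Pre_checkAnswer right response) := by
  unfold Pre_checkAnswer; infer_instance

def pvWitness_checkAnswer : Int × List Int := (1, [3, 7])

def Spec_checkAnswer (right : Int) (response : List Int) (out : Bool) : Prop := out = checkAnswer_alt right response
instance (right : Int) (response : List Int) (out : Bool) : Decidable (Spec_checkAnswer right response out) := by unfold Spec_checkAnswer; infer_instance

-- ===== CLAIM (what is proved, stated in full; the proofs are below) =====
def Claim_equal_checkAnswer : Prop := ∀ (right : Int) (response : List Int), Dom_checkAnswer right response → Pre_checkAnswer right response → Spec_checkAnswer right response (checkAnswer right response)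

-- ===== LEMMAS AND PROOFS =====
theorem pair_eq (a b : Int) (rest : List Int) :
    PySem.List.slice (a :: b :: rest) none (some 2) = [a, b] := by
  rw [show (2 : Int) = ((2 : Nat) : Int) from rfl, PySem.List.slice_to_natCast]
  rfl

-- ===== VERDICT (by name: the statement is the Claim_ definition above) =====
set_option maxRecDepth 4000 in
theorem checkAnswer_spec : Claim_equal_checkAnswer := by
  intro right response _ hpre
  match response with
  | [] => simp [Pre_checkAnswer] at hpre
  | [_] => simp [Pre_checkAnswer] at hpre
  | a :: b :: rest =>
    show checkAnswer right (a :: b :: rest) = checkAnswer_alt right (a :: b :: rest)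
    have hr : PySem.List.pyRange 0 2 1 = [0, 1] := by decide
    have h0 : PySem.List.pyGet? (a :: b :: rest) (0 : Int) = some a :=
      PySem.List.pyGet?_zero_cons a (b :: rest)
    have h1 : PySem.List.pyGet? (a :: b :: rest) (1 : Int) = some b := by
      rw [show (1 : Int) = ((1 : Nat) : Int) from rfl, PySem.List.pyGet?_natCast]; rfl
    have hmax : PySem.List.max? [a, b] (fun x => x) = some (max a b) := by
      rw [PySem.List.max?_id_cons]; rfl
    simp only [checkAnswer, hr, checkAnswerGo, h0, h1, Option.getD_some]
    rcases lt_trichotomy a b with h | h | h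
    · have hm : PySem.List.max? [a, b] (fun x => x) = some b := by
        rw [hmax, max_eq_right h.le]
      rw [if_neg (by omega), if_pos h]
      simp [checkAnswer_alt, pair_eq, hm, PySem.List.enumerate, List.filter]
      have hne : (a == b) = false := by simp [h.ne]
      by_cases hr1 : (1 : Int) = right <;> simp [hne, hr1]
    · subst h
      have hm : PySem.List.max? [a, a] (fun x => x) = some a := by
        rw [hmax, max_self]
      simp [checkAnswer_alt, pair_eq, hm, PySem.List.enumerate, List.filter]
    · have hm : PySem.List.max? [a, b] (fun x => x) = some a := by
        rw [hmax, max_eq_left h.le]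
      rw [if_neg (by omega), if_neg (by omega)]
      simp [checkAnswer_alt, pair_eq, hm, PySem.List.enumerate, List.filter]
      have hne' : (b == a) = false := by simp [h.ne]
      by_cases hr0 : (0 : Int) = right
      · simp [hne', hr0]
      · simp [hne', hr0]
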